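-- pv_equiv track=rewrite | github.com/newjini/Algo_study | Python/Programmers/Lv.2/Prog_124나라의숫자.py | solution
-- ===== SOURCE A (Python) =====
-- def solution(n):
--     num = [1, 2, 4]
--     answer = []
--     while(n!= 0):
--         rest = n % len(num)
--         if rest == 0:
--             n = n - 1
--         n = n // len(num)
--         answer.append(num[rest-1])
--     answer.reverse()
--     return ''.join(map(str, answer))
-- ===== SOURCE B (Python) =====
-- def solution(n):
--     if n == 0:
--         return ''
--     m = n - 1
--     return solution(m // 3) + '124'[m % 3]
-- ===== Notes on version B (the rewrite author's own statement) =====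
-- stated objective: simpler
-- what changed: Replaces the accumulate-in-a-list, rest==0 fixup and final reverse by a direct recursion on (n-1)//3 that indexes '124' with (n-1)%3 and emits digits front-to-back.
import Mathlib
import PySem

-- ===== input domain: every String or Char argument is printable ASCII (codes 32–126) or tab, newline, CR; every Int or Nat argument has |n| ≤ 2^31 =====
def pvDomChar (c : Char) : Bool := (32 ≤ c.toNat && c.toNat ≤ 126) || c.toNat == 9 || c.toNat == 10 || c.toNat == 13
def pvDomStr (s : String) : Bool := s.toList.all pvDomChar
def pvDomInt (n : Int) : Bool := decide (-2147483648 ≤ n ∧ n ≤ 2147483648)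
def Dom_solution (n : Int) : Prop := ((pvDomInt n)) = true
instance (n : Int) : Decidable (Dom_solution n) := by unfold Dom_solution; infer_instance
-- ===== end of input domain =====

-- B replaces A's accumulate-list / rest==0 fixup / reverse-and-join by a direct
-- recursion on (n-1)//3 indexing '124' with (n-1)%3 (simpler; same asymptotic cost).

-- ===== PORT A =====
-- termination measure for A's loop step (cited by the port's decreasing_by)
theorem pvStep_lt (n : Int) (h : ¬ n ≤ 0) :
    (PySem.Int.floordiv (if PySem.Int.mod n 3 = 0 then n - 1 else n) 3).toNat < n.toNat := by
  have h3 : (0 : Int) < 3 := by norm_num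
  simp only [PySem.Int.mod_eq_emod_of_pos h3, PySem.Int.floordiv_eq_ediv_of_pos h3]
  split <;> omega

-- A's while loop; on n < 0 the Python loop never terminates (outside Pre_),
-- so the guard exits there only to make the Lean definition total.
def solutionLoop (n : Int) (answer : List Int) : List Int :=
  if n <= 0 then answer
  else
    solutionLoop (PySem.Int.floordiv (if PySem.Int.mod n 3 = 0 then n - 1 else n) 3)
      (answer ++ [PySem.List.pyGetD [1, 2, 4] (PySem.Int.mod n 3 - 1) 0])
termination_by n.toNat
decreasing_by exact pvStep_lt n (by omega)

def solution (n : Int) : String :=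
  String.join (((solutionLoop n []).reverse).map PySem.Int.toStr)

-- ===== PORT B =====
-- B's recursion; on n < 0 Python B recurses forever (RecursionError, outside Pre_),
-- so the guard returns "" there only to make the Lean definition total.
def solution_alt (n : Int) : String :=
  if n <= 0 then ""
  else
    solution_alt (PySem.Int.floordiv (n - 1) 3)
      ++ String.singleton ((PySem.Str.pyGet? "124" (PySem.Int.mod (n - 1) 3)).getD ' ')
termination_by n.toNat
decreasing_by
  have h1 : PySem.Int.floordiv (n - 1) 3 = (n - 1) / 3 :=
    PySem.Int.floordiv_eq_ediv_of_pos (by norm_num)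
  omega

-- ===== PRECONDITION & SPEC =====
-- Pre_ excludes negative n, on which Python A loops forever (and Python B hits RecursionError).
def Pre_solution (n : Int) : Prop := 0 ≤ n
instance (n : Int) : Decidable (Pre_solution n) := by unfold Pre_solution; infer_instance
def pvWitness_solution : Int := 11

def Spec_solution (n : Int) (out : String) : Prop := out = solution_alt n
instance (n : Int) (out : String) : Decidable (Spec_solution n out) := by unfold Spec_solution; infer_instance

-- ===== CLAIM (what is proved, stated in full; the proofs are below) =====
def Claim_equal_solution : Prop := ∀ (n : Int), Dom_solution n → Pre_solution n → Spec_solution n (solution n)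

-- ===== LEMMAS AND PROOFS =====

theorem pvJoin_snoc (xs : List String) (s : String) :
    String.join (xs ++ [s]) = String.join xs ++ s := by
  simp [String.join, List.foldl_append]

-- the loop only ever appends to its accumulator
theorem solutionLoop_acc (n : Int) (acc : List Int) :
    solutionLoop n acc = acc ++ solutionLoop n [] := by
  induction hk : n.toNat using Nat.strong_induction_on generalizing n acc with
  | _ k ih =>
    rw [solutionLoop]
    conv_rhs => rw [solutionLoop]
    split
    · simp
    · rename_i h
      subst hk
      rw [ih _ (pvStep_lt n h) _ _ rfl, ih _ (pvStep_lt n h) _ ([] ++ _) rfl]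
      simp

theorem solution_eq_alt (n : Int) (hn : 0 ≤ n) : solution n = solution_alt n := by
  induction hk : n.toNat using Nat.strong_induction_on generalizing n with
  | _ k ih =>
    by_cases h : n ≤ 0
    · have h0 : n = 0 := by omega
      subst h0
      rw [solution, solutionLoop, solution_alt]
      simp
      rfl
    · subst hk
      have h3 : (0 : Int) < 3 := by norm_num
      set m := PySem.Int.mod n 3 with hm
      set n2 := PySem.Int.floordiv (if m = 0 then n - 1 else n) 3 with hn2
      have hmv : m = n % 3 := PySem.Int.mod_eq_emod_of_pos h3
      have hn2v : n2 = (n - 1) / 3 := by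
        rw [hn2]
        split
        · rename_i hz
          rw [PySem.Int.floordiv_eq_ediv_of_pos h3]
        · rename_i hz
          rw [PySem.Int.floordiv_eq_ediv_of_pos h3]
          omega
      have hn2nn : 0 ≤ n2 := by rw [hn2v]; omega
      have ihv : solution n2 = solution_alt n2 := ih _ (pvStep_lt n h) n2 hn2nn rfl
      rw [solution] at ihv ⊢
      rw [solutionLoop]
      simp only [if_neg h]
      rw [← hm, ← hn2, solutionLoop_acc]
      conv_rhs => rw [solution_alt, if_neg h]
      have hfd : PySem.Int.floordiv (n - 1) 3 = n2 := by
        rw [hn2v, PySem.Int.floordiv_eq_ediv_of_pos h3]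
      rw [hfd, ← ihv]
      simp only [List.nil_append, List.reverse_append, List.reverse_cons, List.reverse_nil,
        List.map_append, List.map_cons, List.map_nil]
      rw [pvJoin_snoc]
      have hmod : PySem.Int.mod (n - 1) 3 = (n - 1) % 3 := PySem.Int.mod_eq_emod_of_pos h3
      have hr3 : n % 3 = 0 ∨ n % 3 = 1 ∨ n % 3 = 2 := by omega
      rcases hr3 with hc | hc | hc <;>
        [ (have hm1 : (n - 1) % 3 = 2 := by omega);
          (have hm1 : (n - 1) % 3 = 0 := by omega);
          (have hm1 : (n - 1) % 3 = 1 := by omega) ] <;>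
        rw [hmv, hc, hmod, hm1] <;>
        congr 1

-- ===== VERDICT (by name: the statement is the Claim_ definition above) =====
theorem solution_spec : Claim_equal_solution := by
  intro n _ hpre
  exact solution_eq_alt n hpre
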